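-- pv_equiv track=rewrite | github.com/Shirhussain/Algorithm_by_shir | mix/divid_and_conquer/number_factor.py | number_factor
-- ===== SOURCE A (Python) =====
-- def number_factor(num):
--     if num in (0, 1, 2):
--         return 1
--     elif num == 3:
--         return 2
--     else:
--         sub1 = number_factor(num-1)
--         sub2 = number_factor(num-3)
--         sub3 = number_factor(num-4)
--         return sub1 + sub2 + sub3
-- ===== SOURCE B (Python) =====
-- def number_factor(num):
--     # bottom-up rolling DP over f(0..3) = 1,1,1,2; f(n) = f(n-1)+f(n-3)+f(n-4)
--     if num < 3:
--         return 1
--     a, b, c, d = 1, 1, 1, 2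
--     for _ in range(num - 3):
--         a, b, c, d = b, c, d, d + b + a
--     return d
-- ===== Notes on version B (the rewrite author's own statement) =====
-- stated objective: faster
-- what changed: Replaced the exponential triple recursion with a bottom-up rolling-window DP keeping only the last four values; intended as asymptotically faster — a timing run could not confirm a ratio (A timed out at n=16 where B returned, and sizes where both finish are too small to time).
import Mathlib
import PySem

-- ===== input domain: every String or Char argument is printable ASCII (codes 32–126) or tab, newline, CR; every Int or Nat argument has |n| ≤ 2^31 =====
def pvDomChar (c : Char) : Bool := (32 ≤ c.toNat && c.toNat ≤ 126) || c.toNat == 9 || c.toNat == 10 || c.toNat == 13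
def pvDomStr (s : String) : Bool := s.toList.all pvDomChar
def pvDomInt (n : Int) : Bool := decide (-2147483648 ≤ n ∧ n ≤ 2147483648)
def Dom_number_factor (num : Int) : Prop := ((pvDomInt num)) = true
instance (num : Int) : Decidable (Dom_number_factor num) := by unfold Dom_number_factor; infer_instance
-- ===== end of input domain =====

-- B replaces A's exponential triple recursion by a bottom-up rolling-window DP (intended as faster; a timing run could not measure a clean ratio: A timed out where B returned).



-- ===== PORT A =====
-- A's recursion, on the natural number num.toNat (A only returns for num ≥ 0; see Pre_)
def nfRec : Nat → Int
  | 0 => 1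
  | 1 => 1
  | 2 => 1
  | 3 => 2
  | n+4 => nfRec (n+3) + nfRec (n+1) + nfRec n   -- sub1 + sub2 + sub3

def number_factor (num : Int) : Int := nfRec num.toNat

-- ===== PORT B =====
-- rolling window (a,b,c,d) = last four values; one step of the loop body
def nfStep (t : Int × Int × Int × Int) : Int × Int × Int × Int :=
  (t.2.1, t.2.2.1, t.2.2.2, t.2.2.2 + t.2.1 + t.1)

def number_factor_alt (num : Int) : Int :=
  if num < 3 then 1
  else
    ((List.range (num - 3).toNat).foldl (fun t _ => nfStep t) (1, 1, 1, 2)).2.2.2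

-- ===== PRECONDITION & SPEC =====
-- A raises RecursionError on negative num (the recursion never reaches a base case)
def Pre_number_factor (num : Int) : Prop := 0 ≤ num
instance (num : Int) : Decidable (Pre_number_factor num) := by unfold Pre_number_factor; infer_instance
def pvWitness_number_factor : Int := (7)

def Spec_number_factor (num : Int) (out : Int) : Prop := out = number_factor_alt num
instance (num : Int) (out : Int) : Decidable (Spec_number_factor num out) := by unfold Spec_number_factor; infer_instance

-- ===== CLAIM =====
def Claim_equal_number_factor : Prop := ∀ (num : Int), Dom_number_factor num → Pre_number_factor num → Spec_number_factor num (number_factor num)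

-- ===== LEMMAS AND PROOFS =====
-- loop invariant: after k steps the window holds nfRec k .. nfRec (k+3)
theorem nf_fold_inv (k : Nat) :
    (List.range k).foldl (fun t _ => nfStep t) (1, 1, 1, 2)
      = (nfRec k, nfRec (k+1), nfRec (k+2), nfRec (k+3)) := by
  induction k with
  | zero => rfl
  | succ k ih =>
      rw [List.range_succ, List.foldl_append, ih]
      show nfStep _ = _
      simp only [nfStep]
      refine Prod.ext rfl (Prod.ext rfl (Prod.ext rfl ?_))
      show nfRec (k+3) + nfRec (k+1) + nfRec k = nfRec (k+4)
      rfl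

-- ===== VERDICT =====
theorem number_factor_spec : Claim_equal_number_factor := by
  intro num _ hpre
  unfold Pre_number_factor at hpre
  unfold Spec_number_factor number_factor number_factor_alt
  by_cases h : num < 3
  · interval_cases num <;> rfl
  · rw [if_neg h, nf_fold_inv]
    have : (num - 3).toNat + 3 = num.toNat := by omega
    simp [this]
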